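-- pv_equiv track=rewrite | github.com/ladyblueumd/resume_database_system | testing/refresh_work_orders.py | categorize_work_type
-- ===== SOURCE A (Python) =====
-- def categorize_work_type(work_type: str) -> str:
--     """Categorize work type into broader categories"""
--     if not work_type:
--         return "other"
--
--     work_type_lower = work_type.lower()
--
--     if any(keyword in work_type_lower for keyword in ['desktop', 'windows', 'pc', 'computer', 'laptop']):
--         return "desktop"
--     elif any(keyword in work_type_lower for keyword in ['printer', 'print']):
--         return "printer"
--     elif any(keyword in work_type_lower for keyword in ['server', 'storage']):
--         return "server"
--     elif any(keyword in work_type_lower for keyword in ['network', 'switch', 'router']):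
--         return "networking"
--     elif any(keyword in work_type_lower for keyword in ['pos', 'point of sale', 'register']):
--         return "pos"
--     elif any(keyword in work_type_lower for keyword in ['phone', 'voip', 'pots']):
--         return "telephony"
--     elif any(keyword in work_type_lower for keyword in ['kiosk']):
--         return "kiosk"
--     elif any(keyword in work_type_lower for keyword in ['audio', 'visual', 'av']):
--         return "av"
--     else:
--         return "general"
-- ===== SOURCE B (Python) =====
-- # Single left-to-right scan: at each position, look up the candidate substring of each
-- # possible keyword length in one keyword->rank hash table and keep the minimal rank seen.
-- KEYWORD_RANK = {
--     "desktop": 0, "windows": 0, "pc": 0, "computer": 0, "laptop": 0,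
--     "printer": 1, "print": 1,
--     "server": 2, "storage": 2,
--     "network": 3, "switch": 3, "router": 3,
--     "pos": 4, "point of sale": 4, "register": 4,
--     "phone": 5, "voip": 5, "pots": 5,
--     "kiosk": 6,
--     "audio": 7, "visual": 7, "av": 7,
-- }
-- RANK_CATEGORY = ["desktop", "printer", "server", "networking", "pos", "telephony", "kiosk", "av"]
-- KEYWORD_LENGTHS = [2, 3, 4, 5, 6, 7, 8, 13]
--
-- def categorize_work_type(work_type: str) -> str:
--     """Categorize work type into broader categories (position scan + keyword hash index)."""
--     if not work_type:
--         return "other"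
--     s = work_type.lower()
--     best = 8
--     for i in range(len(s)):
--         for length in KEYWORD_LENGTHS:
--             best = min(best, KEYWORD_RANK.get(s[i:i+length], 8))
--     return RANK_CATEGORY[best] if best < 8 else "general"
-- ===== Notes on version B (the rewrite author's own statement) =====
-- stated objective: alternative
-- what changed: Instead of running eight any-keyword substring searches in an if/elif cascade, B makes one left-to-right scan over positions of the lowercased string, looks each candidate slice (one per possible keyword length) up in a single keyword->rank hash table, keeps the minimal rank seen, and maps that rank to its category.
import Mathlib
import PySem

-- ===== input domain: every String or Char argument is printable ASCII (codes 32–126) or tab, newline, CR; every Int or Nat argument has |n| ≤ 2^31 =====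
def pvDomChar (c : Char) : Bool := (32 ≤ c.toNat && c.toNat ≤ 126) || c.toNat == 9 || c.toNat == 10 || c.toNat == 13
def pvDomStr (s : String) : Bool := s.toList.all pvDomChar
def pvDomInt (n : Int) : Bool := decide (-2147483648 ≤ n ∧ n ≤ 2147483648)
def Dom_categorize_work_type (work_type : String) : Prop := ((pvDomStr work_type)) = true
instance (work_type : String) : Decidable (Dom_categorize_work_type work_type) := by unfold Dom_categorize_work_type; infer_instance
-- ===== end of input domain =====

-- B replaces A's eight any-substring-search branches by ONE left-to-right position scan of the
-- lowercased string that looks each candidate slice up in a keyword->rank hash table and keeps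
-- the minimal rank; same return value, a different (indexed single-scan) algorithm.

-- ===== PORT A =====
def categorize_work_type (work_type : String) : String :=
  if work_type = "" then "other"
  else
    let wl := PySem.Str.lower work_type
    if ["desktop", "windows", "pc", "computer", "laptop"].any (fun k => PySem.Str.isIn k wl) then "desktop"
    else if ["printer", "print"].any (fun k => PySem.Str.isIn k wl) then "printer"
    else if ["server", "storage"].any (fun k => PySem.Str.isIn k wl) then "server"
    else if ["network", "switch", "router"].any (fun k => PySem.Str.isIn k wl) then "networking"
    else if ["pos", "point of sale", "register"].any (fun k => PySem.Str.isIn k wl) then "pos"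
    else if ["phone", "voip", "pots"].any (fun k => PySem.Str.isIn k wl) then "telephony"
    else if ["kiosk"].any (fun k => PySem.Str.isIn k wl) then "kiosk"
    else if ["audio", "visual", "av"].any (fun k => PySem.Str.isIn k wl) then "av"
    else "general"

-- ===== PORT B =====
def pvKWS : List (String × Nat) :=
  [("desktop", 0), ("windows", 0), ("pc", 0), ("computer", 0), ("laptop", 0),
   ("printer", 1), ("print", 1),
   ("server", 2), ("storage", 2),
   ("network", 3), ("switch", 3), ("router", 3),
   ("pos", 4), ("point of sale", 4), ("register", 4),
   ("phone", 5), ("voip", 5), ("pots", 5),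
   ("kiosk", 6),
   ("audio", 7), ("visual", 7), ("av", 7)]

def pvKEYWORD_RANK : PySem.Dict String Nat := PySem.Dict.mk pvKWS

def pvRANK_CATEGORY : List String :=
  ["desktop", "printer", "server", "networking", "pos", "telephony", "kiosk", "av"]

def pvKEYWORD_LENGTHS : List Int := [2, 3, 4, 5, 6, 7, 8, 13]

def categorize_work_type_alt (work_type : String) : String :=
  if work_type = "" then "other"
  else
    let s := PySem.Str.lower work_type
    let best := (PySem.List.pyRange 0 (PySem.Str.len s) 1).foldl
      (fun best i => pvKEYWORD_LENGTHS.foldl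
        (fun best length =>
          min best (PySem.Dict.getD pvKEYWORD_RANK (PySem.Str.slice s (some i) (some (i + length))) 8))
        best) 8
    if best < 8 then pvRANK_CATEGORY.getD best "general" else "general"

-- ===== PRECONDITION & SPEC =====
def Spec_categorize_work_type (work_type : String) (out : String) : Prop := out = categorize_work_type_alt work_type
instance (work_type : String) (out : String) : Decidable (Spec_categorize_work_type work_type out) := by unfold Spec_categorize_work_type; infer_instance

-- ===== CLAIM (what is proved, stated in full; the proofs are below) =====
def Claim_equal_categorize_work_type : Prop := ∀ (work_type : String), Dom_categorize_work_type work_type → Spec_categorize_work_type work_type (categorize_work_type work_type)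

-- ===== LEMMAS AND PROOFS =====

-- the keyword lists of A's eight branches, indexed by branch rank
def pvCatKws : Nat → List String
  | 0 => ["desktop", "windows", "pc", "computer", "laptop"]
  | 1 => ["printer", "print"]
  | 2 => ["server", "storage"]
  | 3 => ["network", "switch", "router"]
  | 4 => ["pos", "point of sale", "register"]
  | 5 => ["phone", "voip", "pots"]
  | 6 => ["kiosk"]
  | 7 => ["audio", "visual", "av"]
  | _ => []

def pvT (wl : String) (r : Nat) : Bool := (pvCatKws r).any (fun k => PySem.Str.isIn k wl)

def pvG (s : String) (p : Int × Int) : Nat :=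
  PySem.Dict.getD pvKEYWORD_RANK (PySem.Str.slice s (some p.1) (some (p.1 + p.2))) 8

def pvPairs (s : String) : List (Int × Int) :=
  (PySem.List.pyRange 0 (PySem.Str.len s) 1).flatMap (fun i => pvKEYWORD_LENGTHS.map (fun L => (i, L)))

def pvBest (s : String) : Nat := (pvPairs s).foldl (fun b p => min b (pvG s p)) 8

lemma pvBest_eq (s : String) :
    (PySem.List.pyRange 0 (PySem.Str.len s) 1).foldl
      (fun best i => pvKEYWORD_LENGTHS.foldl
        (fun best length =>
          min best (PySem.Dict.getD pvKEYWORD_RANK (PySem.Str.slice s (some i) (some (i + length))) 8))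
        best) 8 = pvBest s := by
  simp only [pvBest, pvPairs, List.foldl_flatMap, List.foldl_map, pvG]

-- generic min-fold facts
lemma pvMinfold_le_init {α : Type} (f : α → Nat) (l : List α) (a : Nat) :
    l.foldl (fun b x => min b (f x)) a ≤ a := by
  induction l generalizing a with
  | nil => simp
  | cons x xs ih => exact le_trans (ih (min a (f x))) (by omega)

lemma pvMinfold_le_mem {α : Type} (f : α → Nat) (l : List α) (a : Nat) {x : α} (hx : x ∈ l) :
    l.foldl (fun b x => min b (f x)) a ≤ f x := by
  induction l generalizing a with
  | nil => simp at hx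
  | cons y ys ih =>
      rcases List.mem_cons.mp hx with h | h
      · subst h
        exact le_trans (pvMinfold_le_init f ys (min a (f x))) (by omega)
      · exact ih _ h
lemma pvMinfold_cases {α : Type} (f : α → Nat) (l : List α) (a : Nat) :
    l.foldl (fun b x => min b (f x)) a = a ∨ ∃ x ∈ l, l.foldl (fun b x => min b (f x)) a = f x := by
  induction l generalizing a with
  | nil => left; rfl
  | cons y ys ih =>
      rcases ih (min a (f y)) with h | ⟨x, hx, h⟩
      · by_cases hm : a ≤ f y
        · left
          simp only [List.foldl_cons]
          rw [h, min_eq_left hm]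
        · right
          refine ⟨y, List.mem_cons_self, ?_⟩
          simp only [List.foldl_cons]
          rw [h, min_eq_right (le_of_not_ge hm)]
      · right
        refine ⟨x, List.mem_cons_of_mem _ hx, ?_⟩
        simp only [List.foldl_cons]
        exact h

-- assoc-dict lookup: the default, or the value of a key equal to the query
lemma pvGetD_mk_cases (l : List (String × Nat)) (k : String) (d : Nat) :
    PySem.Dict.getD (PySem.Dict.mk l) k d = d ∨
      ∃ p ∈ l, k = p.1 ∧ PySem.Dict.getD (PySem.Dict.mk l) k d = p.2 := by
  induction l with
  | nil => left; simp [PySem.Dict.getD_eq_get?_getD, PySem.Dict.get?]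
  | cons q qs ih =>
      rcases q with ⟨kq, vq⟩
      by_cases h : kq = k
      · right
        refine ⟨(kq, vq), List.mem_cons_self, h.symm, ?_⟩
        simp [PySem.Dict.getD_eq_get?_getD, PySem.Dict.get?_mk_cons, h]
      · have he : PySem.Dict.getD (PySem.Dict.mk ((kq, vq) :: qs)) k d
            = PySem.Dict.getD (PySem.Dict.mk qs) k d := by
          simp [PySem.Dict.getD_eq_get?_getD, PySem.Dict.get?_mk_cons, h]
        rw [he]
        rcases ih with h' | ⟨p, hp, h1, h2⟩
        · left; exact h'
        · right; exact ⟨p, List.mem_cons_of_mem _ hp, h1, h2⟩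

lemma pvKws_facts : ∀ p ∈ pvKWS, p.2 < 8 ∧ p.1.toList ≠ [] ∧
    ((p.1.toList.length : Int) ∈ pvKEYWORD_LENGTHS) ∧ p.1 ∈ pvCatKws p.2 := by decide

lemma pvRank_of_kw : ∀ r < 8, ∀ kw ∈ pvCatKws r, PySem.Dict.getD pvKEYWORD_RANK kw 8 = r := by decide

-- an occurrence pair exists for every keyword occurring as a substring
lemma pvPair_of_isIn (s kw : String) (hne : kw.toList ≠ [])
    (hlen : ((kw.toList.length : Int) ∈ pvKEYWORD_LENGTHS))
    (h : PySem.Str.isIn kw s = true) :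
    ∃ p ∈ pvPairs s, PySem.Str.slice s (some p.1) (some (p.1 + p.2)) = kw := by
  have hin : PySem.Chars.isIn kw.toList s.toList = true := by
    simpa using h
  obtain ⟨j, hpre⟩ := (PySem.Chars.exists_prefix_drop_iff_isIn kw.toList s.toList).mpr hin
  have hj : j < s.toList.length := by
    by_contra hge
    have : s.toList.drop j = [] := List.drop_eq_nil_of_le (by omega)
    rw [this] at hpre
    exact hne (List.prefix_nil.mp hpre)
  refine ⟨((j : Int), (kw.toList.length : Int)), ?_, ?_⟩
  · simp only [pvPairs, List.mem_flatMap, List.mem_map]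
    refine ⟨(j : Int), ?_, ⟨(kw.toList.length : Int), hlen, rfl⟩⟩
    rw [PySem.List.mem_pyRange_one]
    constructor
    · positivity
    · have : PySem.Str.len s = (s.toList.length : Int) := by simp [pysem]
      rw [this]; exact_mod_cast hj
  · apply String.toList_inj.mp
    have hsl : (PySem.Str.slice s (some (j : Int)) (some ((j : Int) + (kw.toList.length : Int)))).toList
        = PySem.List.slice s.toList (some (j : Int)) (some ((j : Int) + (kw.toList.length : Int))) := by
      simp [PySem.Str.slice]
    rw [hsl, PySem.List.slice_natCast_add]
    exact ((List.prefix_iff_eq_take.mp hpre)).symm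

-- every matched pair is a substring occurrence
lemma pvIsIn_of_pair (s : String) (p : Int × Int) (hp : p ∈ pvPairs s) (kw : String)
    (h : PySem.Str.slice s (some p.1) (some (p.1 + p.2)) = kw) :
    PySem.Str.isIn kw s = true := by
  have hp1 : 0 ≤ p.1 := by
    simp only [pvPairs, List.mem_flatMap, List.mem_map] at hp
    obtain ⟨i, hi, L, _, he⟩ := hp
    rw [PySem.List.mem_pyRange_one] at hi
    have : p.1 = i := by rw [← he]
    omega
  have hp2 : 0 ≤ p.2 := by
    simp only [pvPairs, List.mem_flatMap, List.mem_map] at hp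
    obtain ⟨i, _, L, hL, he⟩ := hp
    have hLpos : (0:Int) ≤ L := by
      simp only [pvKEYWORD_LENGTHS, List.mem_cons, List.not_mem_nil, or_false] at hL
      rcases hL with h | h | h | h | h | h | h | h <;> omega
    have : p.2 = L := by rw [← he]
    omega
  rw [PySem.Str.isIn_iff_infix]
  have hsl : kw.toList = (s.toList.drop p.1.toNat).take ((p.1 + p.2).toNat - p.1.toNat) := by
    rw [← h]
    have : (PySem.Str.slice s (some p.1) (some (p.1 + p.2))).toList
        = PySem.List.slice s.toList (some p.1) (some (p.1 + p.2)) := by simp [PySem.Str.slice]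
    rw [this, PySem.List.slice_toNat _ hp1 (by omega)]
  rw [hsl]
  exact (List.take_prefix _ _).isInfix.trans (List.drop_suffix _ _).isInfix

lemma pvBest_le (wl : String) (r : Nat) (hr : r < 8) (h : pvT wl r = true) : pvBest wl ≤ r := by
  obtain ⟨kw, hkw, hin⟩ := List.any_eq_true.mp h
  obtain ⟨p, hp, hsl⟩ := pvPair_of_isIn wl kw
    (by
      rcases pvGetD_mk_cases pvKWS kw 8 with hc | ⟨q, hq, hk, _⟩
      · exfalso
        have h2 : PySem.Dict.getD (PySem.Dict.mk pvKWS) kw 8 = r := pvRank_of_kw r hr kw hkw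
        omega
      · rw [hk]; exact (pvKws_facts q hq).2.1)
    (by
      rcases pvGetD_mk_cases pvKWS kw 8 with hc | ⟨q, hq, hk, _⟩
      · exfalso
        have h2 : PySem.Dict.getD (PySem.Dict.mk pvKWS) kw 8 = r := pvRank_of_kw r hr kw hkw
        omega
      · rw [hk]; exact (pvKws_facts q hq).2.2.1)
    hin
  have hg : pvG wl p = r := by
    rw [pvG, hsl]
    exact pvRank_of_kw r hr kw hkw
  calc pvBest wl ≤ pvG wl p := pvMinfold_le_mem _ _ _ hp
    _ = r := hg

lemma pvHit_of_best (wl : String) (r : Nat) (h : pvBest wl = r) (hr : r < 8) : pvT wl r = true := by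
  rcases pvMinfold_cases (pvG wl) (pvPairs wl) 8 with hc | ⟨p, hp, hc⟩
  · rw [pvBest] at h; omega
  · have hg : PySem.Dict.getD (PySem.Dict.mk pvKWS) (PySem.Str.slice wl (some p.1) (some (p.1 + p.2))) 8 = r := by
      have : pvG wl p = r := by rw [← hc]; rw [pvBest] at h; exact h
      exact this
    rcases pvGetD_mk_cases pvKWS (PySem.Str.slice wl (some p.1) (some (p.1 + p.2))) 8 with hd | ⟨q, hq, hk, hv⟩
    · rw [hd] at hg; omega
    · have hq2 : q.2 = r := by rw [hv] at hg; exact hg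
      have hmem := (pvKws_facts q hq).2.2.2
      rw [hq2] at hmem
      exact List.any_eq_true.mpr ⟨q.1, hmem, pvIsIn_of_pair wl p hp q.1 hk⟩

-- ===== VERDICT (by name: the statement is the Claim_ definition above) =====
theorem categorize_work_type_spec : Claim_equal_categorize_work_type := by
  intro work_type _
  unfold Spec_categorize_work_type
  by_cases hw : work_type = ""
  · simp [categorize_work_type, categorize_work_type_alt, hw]
  · set wl := PySem.Str.lower work_type with hwl
    have hA : categorize_work_type work_type =
        (if pvT wl 0 then "desktop" else if pvT wl 1 then "printer" else if pvT wl 2 then "server"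
         else if pvT wl 3 then "networking" else if pvT wl 4 then "pos" else if pvT wl 5 then "telephony"
         else if pvT wl 6 then "kiosk" else if pvT wl 7 then "av" else "general") := by
      simp only [categorize_work_type, if_neg hw]; rfl
    have hB : categorize_work_type_alt work_type =
        (if pvBest wl < 8 then pvRANK_CATEGORY.getD (pvBest wl) "general" else "general") := by
      simp only [categorize_work_type_alt, if_neg hw, pvBest_eq, ← hwl]
    have hb8 : pvBest wl ≤ 8 := pvMinfold_le_init _ _ _
    have hF : ∀ r < pvBest wl, pvT wl r = false := by
      intro r hrb
      by_contra hne
      have ht : pvT wl r = true := by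
        cases hx : pvT wl r
        · exact absurd hx hne
        · rfl
      have := pvBest_le wl r (by omega) ht
      omega
    have hT : pvBest wl < 8 → pvT wl (pvBest wl) = true := fun h => pvHit_of_best wl _ rfl h
    rw [hA, hB]
    clear hA hB hwl
    generalize hb : pvBest wl = b at hF hT hb8 ⊢
    interval_cases b <;> simp [hF, hT, pvRANK_CATEGORY]
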